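-- pv_equiv track=rewrite | github.com/KomorKoo/Twitch-Kocchi-Bot | Source/buddies.py | lookForSwears
-- ===== SOURCE A (Python) =====
-- def lookForSwears(message):
--     swearsCounter = 0
--     swears = [
--         "kurwa",
--         "chuj"
--     ]
--
--     for element in message.split():
--         for swear in swears:
--             if element.lower() == swear:
--                 swearsCounter += 1
--     if swearsCounter > 5:
--         return True
--     else:
--         return False
-- ===== SOURCE B (Python) =====
-- def lookForSwears(message):
--     needed = 6
--     words = iter(message.lower().split())
--     while needed:
--         w = next(words, None)
--         if w is None:
--             return False
--         if w in ("kurwa", "chuj"):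
--             needed -= 1
--     return True
-- ===== Notes on version B (the rewrite author's own statement) =====
-- stated objective: alternative
-- what changed: Instead of counting all swear occurrences with a nested loop and then comparing the total to 5, B performs a short-circuit search: it consumes the lowercased word stream decrementing a budget of 6 and returns as soon as the 6th swear is found (or the stream ends), never computing a total and with no inner loop over the swear list.
import Mathlib
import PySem

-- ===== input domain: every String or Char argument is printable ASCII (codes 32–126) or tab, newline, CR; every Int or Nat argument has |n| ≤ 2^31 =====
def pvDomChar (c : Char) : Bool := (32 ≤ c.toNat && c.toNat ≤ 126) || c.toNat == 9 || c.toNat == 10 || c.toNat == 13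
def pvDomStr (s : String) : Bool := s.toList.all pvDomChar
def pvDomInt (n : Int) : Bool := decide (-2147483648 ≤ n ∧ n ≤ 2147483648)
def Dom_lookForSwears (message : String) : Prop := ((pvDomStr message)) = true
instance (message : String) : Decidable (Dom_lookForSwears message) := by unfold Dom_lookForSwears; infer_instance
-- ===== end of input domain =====

-- B replaces the nested-loop count-then-threshold with a short-circuit search that
-- consumes the lowercased word stream with a budget of 6 and returns at the 6th swear
-- (alternative decomposition; no total is ever computed).

-- ===== PORT A =====
def lookForSwears (message : String) : Bool :=
  let swears : List String := ["kurwa", "chuj"]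
  let swearsCounter : Int :=
    (PySem.Str.split₀ message).foldl (fun acc element =>
      swears.foldl (fun acc2 swear =>
        if PySem.Str.lower element == swear then acc2 + 1 else acc2) acc) 0
  if swearsCounter > 5 then true else false

-- ===== PORT B =====
-- the `while needed:` loop consuming the word iterator, with its early returns
def lookForSwearsAltGo : List String → Nat → Bool
  | _, 0 => true
  | [], _ + 1 => false
  | w :: rest, n + 1 =>
      if w == "kurwa" || w == "chuj" then lookForSwearsAltGo rest n
      else lookForSwearsAltGo rest (n + 1)

def lookForSwears_alt (message : String) : Bool :=
  lookForSwearsAltGo (PySem.Str.split₀ (PySem.Str.lower message)) 6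

-- ===== PRECONDITION & SPEC =====
def Spec_lookForSwears (message : String) (out : Bool) : Prop := out = lookForSwears_alt message
instance (message : String) (out : Bool) : Decidable (Spec_lookForSwears message out) := by unfold Spec_lookForSwears; infer_instance

-- ===== CLAIM (what is proved, stated in full; the proofs are below) =====
def Claim_equal_lookForSwears : Prop := ∀ (message : String), Dom_lookForSwears message → Spec_lookForSwears message (lookForSwears message)

-- ===== LEMMAS AND PROOFS =====

theorem pv_toNat_ofNat_add32 (c : Char) (h : c.toNat ≤ 90) :
    (Char.ofNat (c.toNat + 32)).toNat = c.toNat + 32 := by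
  have hv : (c.toNat + 32).isValidChar := by unfold Nat.isValidChar; left; omega
  simp only [Char.ofNat, Char.toNat] at *
  rw [dif_pos hv]
  simp only [Char.ofNatAux, UInt32.toNat, BitVec.toNat_ofNatLT]

theorem pv_isspace_lowerChar (c : Char) :
    PySem.Chars.isspace (PySem.Chars.lowerChar c) = PySem.Chars.isspace c := by
  unfold PySem.Chars.lowerChar
  by_cases h : PySem.Chars.isupper c = true
  · rw [if_pos h]
    have hb : 65 ≤ c.toNat ∧ c.toNat ≤ 90 := by
      unfold PySem.Chars.isupper at h
      simp only [Bool.and_eq_true, decide_eq_true_eq, Char.le_def] at h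
      exact ⟨h.1, h.2⟩
    obtain ⟨h1, h2⟩ := hb
    have ht := pv_toNat_ofNat_add32 c h2
    unfold PySem.Chars.isspace
    rw [ht]
    trans false
    · simp only [Bool.or_eq_false_iff, Bool.and_eq_false_iff, decide_eq_false_iff_not]
      omega
    · symm
      simp only [Bool.or_eq_false_iff, Bool.and_eq_false_iff, decide_eq_false_iff_not]
      omega
  · rw [if_neg h]

theorem pv_go_lower (s cur : List Char) (acc : List (List Char)) :
    PySem.Chars.split₀.go (s.map PySem.Chars.lowerChar) (cur.map PySem.Chars.lowerChar)
        (acc.map (List.map PySem.Chars.lowerChar)) =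
      (PySem.Chars.split₀.go s cur acc).map (List.map PySem.Chars.lowerChar) := by
  induction s generalizing cur acc with
  | nil =>
    simp only [List.map_nil, PySem.Chars.split₀.go]
    by_cases h : cur.isEmpty = true
    · simp [List.isEmpty_iff.mp h]
    · have h' : (cur.map PySem.Chars.lowerChar).isEmpty = false := by
        simp only [List.isEmpty_eq_false_iff] at *; simpa using h
      simp only [List.isEmpty_eq_false_iff] at h
      simp [h', h, List.map_reverse]
  | cons c rest ih =>
    simp only [List.map_cons, PySem.Chars.split₀.go, pv_isspace_lowerChar]
    by_cases hs : PySem.Chars.isspace c = true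
    · rw [if_pos hs, if_pos hs]
      by_cases h : cur.isEmpty = true
      · have h' : (cur.map PySem.Chars.lowerChar).isEmpty = true := by
          simp only [List.isEmpty_iff] at *; simp [h]
        rw [if_pos h, if_pos h']
        exact ih [] acc
      · have h' : (cur.map PySem.Chars.lowerChar).isEmpty = false := by
          simp only [List.isEmpty_eq_false_iff] at *; simpa using h
        rw [if_neg h, if_neg (by simp [h'])]
        have := ih [] (cur.reverse :: acc)
        simpa [List.map_reverse] using this
    · rw [if_neg hs, if_neg hs]
      exact ih (c :: cur) acc

theorem pv_split₀_lower (l : List Char) :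
    PySem.Chars.split₀ (PySem.Chars.lower l) =
      (PySem.Chars.split₀ l).map PySem.Chars.lower := by
  unfold PySem.Chars.split₀ PySem.Chars.lower
  have := pv_go_lower l [] []
  simpa using this

theorem pv_str_split₀_lower (s : String) :
    PySem.Str.split₀ (PySem.Str.lower s) = (PySem.Str.split₀ s).map PySem.Str.lower := by
  have hinj : Function.Injective (List.map String.toList (α := String)) :=
    List.map_injective_iff.mpr (fun a b h => by
      have h2 := congrArg String.ofList h
      simpa using h2)
  apply hinj
  rw [PySem.Str.split₀_map_toList, PySem.Str.toList_lower, pv_split₀_lower,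
      ← PySem.Str.split₀_map_toList, List.map_map, List.map_map]
  congr 1
  funext w
  simp [PySem.Str.toList_lower, PySem.Chars.lower]

theorem pv_inner_fold (w : String) (acc : Int) :
    (["kurwa", "chuj"] : List String).foldl (fun acc2 swear =>
        if PySem.Str.lower w == swear then acc2 + 1 else acc2) acc =
      acc + (if PySem.Str.lower w == "kurwa" ∨ PySem.Str.lower w == "chuj" then 1 else 0) := by
  simp only [List.foldl]
  by_cases h1 : (PySem.Str.lower w == "kurwa") = true <;>
    by_cases h2 : (PySem.Str.lower w == "chuj") = true <;>
    simp [h1, h2]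
  · exact absurd (LawfulBEq.eq_of_beq h2 ▸ LawfulBEq.eq_of_beq h1) (by decide)

theorem pv_foldl_count (ws : List String) (n : Int) :
    ws.foldl (fun acc element =>
        (["kurwa", "chuj"] : List String).foldl (fun acc2 swear =>
          if PySem.Str.lower element == swear then acc2 + 1 else acc2) acc) n =
      n + (ws.countP (fun w => PySem.Str.lower w == "kurwa" || PySem.Str.lower w == "chuj") : Int) := by
  induction ws generalizing n with
  | nil => simp
  | cons w ws ih =>
    rw [List.foldl_cons, pv_inner_fold, ih, List.countP_cons]
    by_cases h1 : (PySem.Str.lower w == "kurwa") = true <;>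
      by_cases h2 : (PySem.Str.lower w == "chuj") = true <;>
      simp [h1, h2] <;> push_cast <;> ring

theorem pv_altGo_eq (ws : List String) (n : Nat) :
    lookForSwearsAltGo ws n =
      decide (n ≤ ws.countP (fun w => w == "kurwa" || w == "chuj")) := by
  induction ws generalizing n with
  | nil =>
    cases n with
    | zero => simp [lookForSwearsAltGo]
    | succ k => simp [lookForSwearsAltGo]
  | cons w ws ih =>
    cases n with
    | zero => simp [lookForSwearsAltGo]
    | succ k =>
      simp only [lookForSwearsAltGo, List.countP_cons]
      by_cases h : (w == "kurwa" || w == "chuj") = true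
      · rw [if_pos h, ih]
        simp only [h, if_pos]
        simp only [decide_eq_decide]
        omega
      · rw [if_neg h, ih]
        simp only [h, if_neg]
        simp only [decide_eq_decide, Bool.false_eq_true, if_false]
        omega

theorem pv_countP_map_lower (ws : List String) :
    (ws.map PySem.Str.lower).countP (fun w => w == "kurwa" || w == "chuj") =
      ws.countP (fun w => PySem.Str.lower w == "kurwa" || PySem.Str.lower w == "chuj") := by
  rw [List.countP_map]
  rfl

-- ===== VERDICT (by name: the statement is the Claim_ definition above) =====
theorem lookForSwears_spec : Claim_equal_lookForSwears := by
  intro message _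
  unfold Spec_lookForSwears lookForSwears lookForSwears_alt
  rw [pv_str_split₀_lower, pv_altGo_eq, pv_countP_map_lower]
  simp only [pv_foldl_count]
  split_ifs with h
  · symm; simp only [decide_eq_true_eq]; omega
  · symm; simp only [decide_eq_false_iff_not]; omega
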